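-- pv_equiv track=rewrite | github.com/CadeReinberger/CampEuclid2_2019 | CuboidModP.py | get_pos_trios
-- ===== SOURCE A (Python) =====
-- import itertools as it
--
-- def gen_quad_residues(p):
--     if p == 2:
--         return range(2)
--     else:
--         res = []
--         for i in range(0, (p+1) // 2):
--             res.append( i * i % p)
--         return res
--
-- def get_pos_trios(p):
--     def get_nontrivial_negations(sol):
--         def get_negs(ind):
--             if sol[ind] == 0:
--                 return [sol[ind]]
--             else:
--                 return [sol[ind], p - sol[ind]]
--         nontrivial_negs = []
--         a_vals = get_negs(0)
--         b_vals = get_negs(1)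
--         c_vals = get_negs(2)
--         for a in a_vals:
--             for b in b_vals:
--                 for c in c_vals:
--                     nontrivial_negs.append([a, b, c])
--         return nontrivial_negs
--     res = gen_quad_residues(p)
--     sols = []
--     for triple in it.combinations_with_replacement(range(0, (p+1)//2), 3):
--         a = triple[0] * triple[0] % p
--         b = triple[1] * triple[1] % p
--         c = triple[2] * triple[2] % p
--         if (a+b) % p in res and (b+c) % p in res and (a+c) % p in res and (a + b + c) % p in res:
--             new_sols = get_nontrivial_negations([triple[0], triple[1], triple[2]])
--             for solution in new_sols:
--                 if not solution in sols:
--                     sols.append(solution)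
--     return sols
-- ===== SOURCE B (Python) =====
-- def get_pos_trios(p):
--     m = (p + 1) // 2
--     qr = set(range(2)) if p == 2 else {i * i % p for i in range(m)}
--     sq = [i * i % p for i in range(m)]
--     good = [[j for j in range(i, m) if (sq[i] + sq[j]) % p in qr] for i in range(m)]
--     neg = [[i, p - i] if i else [0] for i in range(m)]
--     sols = []
--     for i in range(m):
--         for j in good[i]:
--             ok = set(good[j])
--             for k in good[i]:
--                 if k >= j and k in ok and (sq[i] + sq[j] + sq[k]) % p in qr:
--                     sols.extend([x, y, z] for x in neg[i] for y in neg[j] for z in neg[k])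
--     return sols
-- ===== Notes on version B (the rewrite author's own statement) =====
-- stated objective: faster
-- what changed: Replaces A's single pass over all combinations_with_replacement triples with O(p) residue-list membership tests and an O(|sols|) dedup scan per candidate by a staged graph algorithm: precompute the squares table, a quadratic-residue set and per-vertex adjacency lists of residue-compatible partners, enumerate triangles over those adjacency lists, and append sign expansions directly with no dedup at all (proved in Lean: duplicates can never arise).
import Mathlib
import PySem

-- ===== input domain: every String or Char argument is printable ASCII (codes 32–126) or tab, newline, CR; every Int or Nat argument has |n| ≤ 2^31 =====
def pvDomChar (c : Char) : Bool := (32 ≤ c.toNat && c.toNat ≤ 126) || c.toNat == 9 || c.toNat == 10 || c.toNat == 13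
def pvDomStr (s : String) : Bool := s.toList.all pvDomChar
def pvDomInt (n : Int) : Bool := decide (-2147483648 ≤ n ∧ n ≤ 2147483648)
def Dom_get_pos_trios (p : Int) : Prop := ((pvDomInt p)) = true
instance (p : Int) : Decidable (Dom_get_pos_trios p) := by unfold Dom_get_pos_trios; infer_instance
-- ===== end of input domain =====

-- B drops A's triple enumeration + linear membership + dedup scan for a staged graph algorithm:
-- precompute squares and per-vertex adjacency lists of residue-compatible partners, enumerate
-- triangles over those adjacency lists, and append sign expansions directly with NO dedup
-- (proved below: duplicates can never arise). Objective: faster.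

-- ===== PORT A =====
def gen_quad_residues (p : Int) : List Int :=
  if p == 2 then PySem.List.pyRange 0 2 1
  else (PySem.List.pyRange 0 (PySem.Int.floordiv (p + 1) 2) 1).foldl
    (fun res i => res ++ [PySem.Int.mod (i * i) p]) []

-- itertools.combinations_with_replacement(xs, 3) ported by hand (not in PySem): CPython yields
-- tuples of elements at non-decreasing index positions, in index-lexicographic order — exact.
def cwr2 {α : Type} (xs : List α) : List (α × α) :=
  match xs with
  | [] => []
  | x :: t => (x :: t).map (fun y => (x, y)) ++ cwr2 t

def cwr3 {α : Type} (xs : List α) : List (α × α × α) :=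
  match xs with
  | [] => []
  | x :: t => (cwr2 (x :: t)).map (fun yz => (x, yz.1, yz.2)) ++ cwr3 t

-- sol[ind]: ind ∈ {0,1,2} and sol has length 3 at every call site, so indexing never raises;
-- pyGetD with default 0 is exact here.
def get_negs (p : Int) (sol : List Int) (ind : Int) : List Int :=
  let v := PySem.List.pyGetD sol ind 0
  if v == 0 then [v] else [v, p - v]

def get_nontrivial_negations (p : Int) (sol : List Int) : List (List Int) :=
  let a_vals := get_negs p sol 0
  let b_vals := get_negs p sol 1
  let c_vals := get_negs p sol 2
  a_vals.foldl (fun acc a =>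
    b_vals.foldl (fun acc b =>
      c_vals.foldl (fun acc c => acc ++ [[a, b, c]]) acc) acc) []

def get_pos_trios (p : Int) : List (List Int) :=
  let res := gen_quad_residues p
  (cwr3 (PySem.List.pyRange 0 (PySem.Int.floordiv (p + 1) 2) 1)).foldl
    (fun sols triple =>
      let a := PySem.Int.mod (triple.1 * triple.1) p
      let b := PySem.Int.mod (triple.2.1 * triple.2.1) p
      let c := PySem.Int.mod (triple.2.2 * triple.2.2) p
      if res.contains (PySem.Int.mod (a + b) p) && res.contains (PySem.Int.mod (b + c) p)
          && res.contains (PySem.Int.mod (a + c) p)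
          && res.contains (PySem.Int.mod (a + b + c) p) then
        (get_nontrivial_negations p [triple.1, triple.2.1, triple.2.2]).foldl
          (fun sols solution => if sols.contains solution then sols else sols ++ [solution]) sols
      else sols) []

-- ===== PORT B =====
def get_pos_trios_alt (p : Int) : List (List Int) :=
  let m := PySem.Int.floordiv (p + 1) 2
  let qr : PySem.Set Int :=
    if p == 2 then PySem.Set.ofList (PySem.List.pyRange 0 2 1)
    else PySem.Set.ofList ((PySem.List.pyRange 0 m 1).map (fun i => PySem.Int.mod (i * i) p))
  let sq := (PySem.List.pyRange 0 m 1).map (fun i => PySem.Int.mod (i * i) p)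
  let good := (PySem.List.pyRange 0 m 1).map (fun i =>
    (PySem.List.pyRange i m 1).filter (fun j =>
      PySem.Set.contains qr
        (PySem.Int.mod (PySem.List.pyGetD sq i 0 + PySem.List.pyGetD sq j 0) p)))
  let neg := (PySem.List.pyRange 0 m 1).map (fun i => if i == 0 then [(0 : Int)] else [i, p - i])
  (PySem.List.pyRange 0 m 1).foldl (fun sols i =>
    (PySem.List.pyGetD good i []).foldl (fun sols j =>
      let ok := PySem.Set.ofList (PySem.List.pyGetD good j [])
      (PySem.List.pyGetD good i []).foldl (fun sols k =>
        if decide (j ≤ k) && PySem.Set.contains ok k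
            && PySem.Set.contains qr
              (PySem.Int.mod
                (PySem.List.pyGetD sq i 0 + PySem.List.pyGetD sq j 0 + PySem.List.pyGetD sq k 0) p)
        then
          sols ++ (PySem.List.pyGetD neg i []).flatMap (fun x =>
            (PySem.List.pyGetD neg j []).flatMap (fun y =>
              (PySem.List.pyGetD neg k []).map (fun z => [x, y, z])))
        else sols) sols) sols) []

-- ===== PRECONDITION & SPEC =====
def Spec_get_pos_trios (p : Int) (out : List (List Int)) : Prop := out = get_pos_trios_alt p
instance (p : Int) (out : List (List Int)) : Decidable (Spec_get_pos_trios p out) := by unfold Spec_get_pos_trios; infer_instance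

-- ===== CLAIM (what is proved, stated in full; the proofs are below) =====
def Claim_equal_get_pos_trios : Prop := ∀ (p : Int), Dom_get_pos_trios p → Spec_get_pos_trios p (get_pos_trios p)

-- ===== LEMMAS AND PROOFS =====

-- shared vocabulary for the proof: m, the squares, the residue tests, the sign expansions
def pvM (p : Int) : Int := PySem.Int.floordiv (p + 1) 2
def pvSq (p i : Int) : Int := PySem.Int.mod (i * i) p
def pvAB (p i j : Int) : Bool :=
  (gen_quad_residues p).contains (PySem.Int.mod (pvSq p i + pvSq p j) p)
def pvSum (p i j k : Int) : Bool :=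
  (gen_quad_residues p).contains (PySem.Int.mod (pvSq p i + pvSq p j + pvSq p k) p)
def pvNegs (p i : Int) : List Int := if i == 0 then [(0 : Int)] else [i, p - i]
def pvExp (p i j k : Int) : List (List Int) :=
  (pvNegs p i).flatMap (fun x =>
    (pvNegs p j).flatMap (fun y =>
      (pvNegs p k).map (fun z => [x, y, z])))

def pvCond (p i j k : Int) : Bool := pvAB p i j && pvAB p j k && pvAB p i k && pvSum p i j k
def pvKs (p i j : Int) : List Int :=
  (PySem.List.pyRange j (pvM p) 1).filter (fun k => pvAB p j k && pvAB p i k && pvSum p i j k)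

-- the common normal form: the full candidate list, in generation order
def pvCand (p : Int) : List (List Int) :=
  (PySem.List.pyRange 0 (pvM p) 1).flatMap (fun i =>
    ((PySem.List.pyRange i (pvM p) 1).filter (fun j => pvAB p i j)).flatMap (fun j =>
      (pvKs p i j).flatMap (fun k => pvExp p i j k)))

-- B's intermediate data, as standalone definitions (definitionally B's let-bindings)
def pvQR (p : Int) : PySem.Set Int :=
  if p == 2 then PySem.Set.ofList (PySem.List.pyRange 0 2 1)
  else PySem.Set.ofList ((PySem.List.pyRange 0 (pvM p) 1).map (fun i => PySem.Int.mod (i * i) p))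
def pvSqL (p : Int) : List Int :=
  (PySem.List.pyRange 0 (pvM p) 1).map (fun i => PySem.Int.mod (i * i) p)
def pvGoodL (p : Int) : List (List Int) :=
  (PySem.List.pyRange 0 (pvM p) 1).map (fun i =>
    (PySem.List.pyRange i (pvM p) 1).filter (fun j =>
      PySem.Set.contains (pvQR p)
        (PySem.Int.mod (PySem.List.pyGetD (pvSqL p) i 0 + PySem.List.pyGetD (pvSqL p) j 0) p)))
def pvNegL (p : Int) : List (List Int) :=
  (PySem.List.pyRange 0 (pvM p) 1).map (fun i => if i == 0 then [(0 : Int)] else [i, p - i])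
def pvB (p : Int) : List (List Int) :=
  (PySem.List.pyRange 0 (pvM p) 1).foldl (fun sols i =>
    (PySem.List.pyGetD (pvGoodL p) i []).foldl (fun sols j =>
      (PySem.List.pyGetD (pvGoodL p) i []).foldl (fun sols k =>
        if decide (j ≤ k)
            && PySem.Set.contains (PySem.Set.ofList (PySem.List.pyGetD (pvGoodL p) j [])) k
            && PySem.Set.contains (pvQR p)
              (PySem.Int.mod (PySem.List.pyGetD (pvSqL p) i 0 + PySem.List.pyGetD (pvSqL p) j 0
                + PySem.List.pyGetD (pvSqL p) k 0) p) then
          sols ++ (PySem.List.pyGetD (pvNegL p) i []).flatMap (fun x =>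
            (PySem.List.pyGetD (pvNegL p) j []).flatMap (fun y =>
              (PySem.List.pyGetD (pvNegL p) k []).map (fun z => [x, y, z])))
        else sols) sols) sols) []

-- A's dedup-append step
def pvDD (s : List (List Int)) (x : List Int) : List (List Int) :=
  if s.contains x then s else s ++ [x]

theorem pv2m_le (p : Int) : 2 * pvM p ≤ p + 1 := by
  have h := PySem.Int.floordiv_eq_ediv_of_pos (a := p + 1) (b := 2) (by omega)
  unfold pvM; omega

-- ---- cwr3 over a range is the nested "for j in range(i, b)" structure ----
theorem cwr2_pyRange_aux (b : Int) : ∀ (n : Nat) (a : Int), (b - a).toNat = n →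
    cwr2 (PySem.List.pyRange a b 1) =
      (PySem.List.pyRange a b 1).flatMap
        (fun i => (PySem.List.pyRange i b 1).map (fun j => (i, j))) := by
  intro n
  induction n with
  | zero =>
    intro a h
    rw [PySem.List.pyRange_one_eq_nil (by omega)]
    rfl
  | succ n ih =>
    intro a h
    have hab : a < b := by omega
    have hc := PySem.List.pyRange_one_cons hab
    rw [hc]
    show (a :: PySem.List.pyRange (a + 1) b 1).map (fun y => (a, y))
        ++ cwr2 (PySem.List.pyRange (a + 1) b 1) = _
    rw [List.flatMap_cons, ih (a + 1) (by omega), hc]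

theorem cwr3_pyRange_aux (b : Int) : ∀ (n : Nat) (a : Int), (b - a).toNat = n →
    cwr3 (PySem.List.pyRange a b 1) =
      (PySem.List.pyRange a b 1).flatMap (fun i =>
        (PySem.List.pyRange i b 1).flatMap (fun j =>
          (PySem.List.pyRange j b 1).map (fun k => (i, j, k)))) := by
  intro n
  induction n with
  | zero =>
    intro a h
    rw [PySem.List.pyRange_one_eq_nil (by omega)]
    rfl
  | succ n ih =>
    intro a h
    have hab : a < b := by omega
    have hc := PySem.List.pyRange_one_cons hab
    rw [hc]
    show (cwr2 (a :: PySem.List.pyRange (a + 1) b 1)).map (fun yz => (a, yz.1, yz.2))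
        ++ cwr3 (PySem.List.pyRange (a + 1) b 1) = _
    rw [List.flatMap_cons, ih (a + 1) (by omega), ← hc, cwr2_pyRange_aux b (b - a).toNat a rfl,
      List.map_flatMap]
    simp only [List.map_map]
    rfl

theorem cwr3_pyRange (a b : Int) :
    cwr3 (PySem.List.pyRange a b 1) =
      (PySem.List.pyRange a b 1).flatMap (fun i =>
        (PySem.List.pyRange i b 1).flatMap (fun j =>
          (PySem.List.pyRange j b 1).map (fun k => (i, j, k)))) :=
  cwr3_pyRange_aux b (b - a).toNat a rfl

-- A's negation helper produces exactly the expansion list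
theorem negations_eq (p i j k : Int) :
    get_nontrivial_negations p [i, j, k] = pvExp p i j k := by
  have hz : ∀ x : Int, (if x == 0 then [x] else [x, p - x]) = pvNegs p x := by
    intro x; unfold pvNegs; by_cases h : x = 0 <;> simp [h]
  have g0 : get_negs p [i, j, k] 0 = pvNegs p i := by rw [← hz i]; rfl
  have g1 : get_negs p [i, j, k] 1 = pvNegs p j := by rw [← hz j]; rfl
  have g2 : get_negs p [i, j, k] 2 = pvNegs p k := by rw [← hz k]; rfl
  show (get_negs p [i,j,k] 0).foldl (fun acc a =>
    (get_negs p [i,j,k] 1).foldl (fun acc b =>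
      (get_negs p [i,j,k] 2).foldl (fun acc c => acc ++ [[a, b, c]]) acc) acc) [] = _
  rw [g0, g1, g2]
  rw [show (fun (acc : List (List Int)) (a : Int) =>
      (pvNegs p j).foldl (fun acc b =>
        (pvNegs p k).foldl (fun acc c => acc ++ [[a, b, c]]) acc) acc)
    = (fun (acc : List (List Int)) (a : Int) => acc ++
        (pvNegs p j).flatMap (fun y => (pvNegs p k).map (fun z => [a, y, z]))) from by
      funext acc a
      rw [show (fun (acc : List (List Int)) (b : Int) =>
          (pvNegs p k).foldl (fun acc c => acc ++ [[a, b, c]]) acc)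
        = (fun (acc : List (List Int)) (b : Int) => acc ++
            (pvNegs p k).map (fun z => [a, b, z])) from by
          funext acc b
          exact PySem.List.foldl_append_singleton_eq_map _ _ _]
      exact PySem.List.foldl_append_eq_flatMap _ _ _]
  rw [PySem.List.foldl_append_eq_flatMap]
  rfl

-- B's residue set answers membership exactly as A's residue list
theorem res_contains (p x : Int) :
    PySem.Set.contains (pvQR p) x = (gen_quad_residues p).contains x := by
  unfold pvQR gen_quad_residues pvM
  split
  · rw [PySem.Set.ofList_eq_self_of_nodup _ (PySem.List.nodup_pyRange_one 0 2)]; rfl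
  · rw [PySem.List.foldl_append_singleton_eq_map]
    simp [pysem]

-- ---- generic fold-shape lemmas ----
theorem foldl_inner_foldl {α : Type} (f : α → List (List Int)) (l : List α)
    (acc : List (List Int)) :
    l.foldl (fun s t => (f t).foldl pvDD s) acc = (l.flatMap f).foldl pvDD acc := by
  induction l generalizing acc with
  | nil => rfl
  | cons a t ih => rw [List.foldl_cons, List.flatMap_cons, List.foldl_append, ih]

theorem foldl_inner_foldl_if {α : Type} (c : α → Bool) (f : α → List (List Int)) (l : List α)
    (acc : List (List Int)) :
    l.foldl (fun s t => if c t then (f t).foldl pvDD s else s) acc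
      = ((l.filter c).flatMap f).foldl pvDD acc := by
  induction l generalizing acc with
  | nil => rfl
  | cons a t ih =>
    rw [List.foldl_cons, List.filter_cons]
    by_cases h : c a
    · simp only [h, if_true, List.flatMap_cons, List.foldl_append, ih]
    · simp only [h, Bool.false_eq_true, if_false, ih]

theorem foldl_dd_nodup : ∀ (l : List (List Int)) (acc : List (List Int)),
    (acc ++ l).Nodup → l.foldl pvDD acc = acc ++ l := by
  intro l
  induction l with
  | nil => intro acc _; simp
  | cons x t ih =>
    intro acc h
    have hx : x ∉ acc := by
      intro hm
      exact (List.disjoint_of_nodup_append h) hm List.mem_cons_self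
    have h' : ((acc ++ [x]) ++ t).Nodup := by simpa using h
    rw [List.foldl_cons, show pvDD acc x = acc ++ [x] from by
        unfold pvDD; simp [hx], ih _ h']
    simp

theorem nodup_flatMap_inj {α β : Type} (f : α → List β) (g : β → α) :
    ∀ (l : List α), l.Nodup → (∀ a ∈ l, (f a).Nodup) → (∀ a ∈ l, ∀ b ∈ f a, g b = a) →
      (l.flatMap f).Nodup := by
  intro l
  induction l with
  | nil => intro _ _ _; simp
  | cons a t ih =>
    intro hl hf hg
    rw [List.flatMap_cons]
    refine List.Nodup.append (hf a List.mem_cons_self)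
      (ih (List.Nodup.of_cons hl)
        (fun x hx => hf x (List.mem_cons_of_mem a hx))
        (fun x hx b hb => hg x (List.mem_cons_of_mem a hx) b hb)) ?_
    intro b hb1 hb2
    obtain ⟨x, hx, hbx⟩ := List.mem_flatMap.mp hb2
    have h1 : g b = a := hg a List.mem_cons_self b hb1
    have h2 : g b = x := hg x (List.mem_cons_of_mem a hx) b hbx
    have : a ∉ t := (List.nodup_cons.mp hl).1
    exact this (h1 ▸ h2 ▸ hx)

-- ---- A equals the candidate list fold ----
theorem kfold (p i j : Int) (sols : List (List Int)) :
    (PySem.List.pyRange j (pvM p) 1).foldl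
      (fun s k => if pvCond p i j k then (pvExp p i j k).foldl pvDD s else s) sols
    = if pvAB p i j then ((pvKs p i j).flatMap (fun k => pvExp p i j k)).foldl pvDD sols
      else sols := by
  rw [foldl_inner_foldl_if]
  cases h : pvAB p i j
  · have he : (PySem.List.pyRange j (pvM p) 1).filter (fun k => pvCond p i j k) = [] :=
      List.filter_eq_nil_iff.mpr (fun k _ => by simp [pvCond, h])
    simp [he]
  · have he : (PySem.List.pyRange j (pvM p) 1).filter (fun k => pvCond p i j k) = pvKs p i j := by
      unfold pvKs
      exact List.filter_congr (fun k _ => by simp [pvCond, h])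
    simp [he]

theorem A_eq_fold (p : Int) : get_pos_trios p = (pvCand p).foldl pvDD [] := by
  simp only [get_pos_trios]
  simp only [cwr3_pyRange]
  simp only [List.foldl_flatMap, List.foldl_map]
  show (PySem.List.pyRange 0 (pvM p) 1).foldl
      (fun sols i => (PySem.List.pyRange i (pvM p) 1).foldl
        (fun sols j => (PySem.List.pyRange j (pvM p) 1).foldl
          (fun sols k => if pvCond p i j k
            then (get_nontrivial_negations p [i, j, k]).foldl pvDD sols else sols) sols) sols) []
    = (pvCand p).foldl pvDD []
  simp only [negations_eq, kfold]
  simp only [foldl_inner_foldl_if, foldl_inner_foldl]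
  rfl

-- ---- the candidate list has no duplicates ----
theorem negs_nodup (p i : Int) (_h0 : 0 ≤ i) (h1 : i < pvM p) : (pvNegs p i).Nodup := by
  have h2 := pv2m_le p
  unfold pvNegs
  by_cases h : i = 0
  · simp [h]
  · have : i ≠ p - i := by omega
    simp [h, this]

theorem decode_negs (p i x : Int) (_h0 : 0 ≤ i) (h1 : i < pvM p) (hx : x ∈ pvNegs p i) :
    (if x < pvM p then x else p - x) = i := by
  have h2 := pv2m_le p
  unfold pvNegs at hx
  by_cases h : i = 0
  · simp [h] at hx
    simp [hx, h]
    omega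
  · simp [h] at hx
    rcases hx with hx | hx
    · simp [hx, h1]
    · have hge : ¬ (p - i < pvM p) := by omega
      simp [hx, hge]

theorem mem_exp (p i j k : Int) (b : List Int) (hb : b ∈ pvExp p i j k) :
    ∃ x y z, x ∈ pvNegs p i ∧ y ∈ pvNegs p j ∧ z ∈ pvNegs p k ∧ b = [x, y, z] := by
  simp only [pvExp, List.mem_flatMap, List.mem_map] at hb
  obtain ⟨x, hx, y, hy, z, hz, hzz⟩ := hb
  exact ⟨x, y, z, hx, hy, hz, hzz.symm⟩

theorem exp_nodup (p i j k : Int)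
    (hi : 0 ≤ i ∧ i < pvM p) (hj : 0 ≤ j ∧ j < pvM p) (hk : 0 ≤ k ∧ k < pvM p) :
    (pvExp p i j k).Nodup := by
  unfold pvExp
  refine nodup_flatMap_inj _ (fun b => PySem.List.pyGetD b 0 0) _
    (negs_nodup p i hi.1 hi.2) ?_ ?_
  · intro x _
    refine nodup_flatMap_inj _ (fun b => PySem.List.pyGetD b 1 0) _
      (negs_nodup p j hj.1 hj.2) ?_ ?_
    · intro y _
      refine List.Nodup.map ?_ (negs_nodup p k hk.1 hk.2)
      intro z z' hzz
      simpa using hzz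
    · intro y _ b hb
      obtain ⟨z, _, hz⟩ := List.mem_map.mp hb
      rw [← hz]; rfl
  · intro x _ b hb
    obtain ⟨y, _, hby⟩ := List.mem_flatMap.mp hb
    obtain ⟨z, _, hz⟩ := List.mem_map.mp hby
    rw [← hz]; rfl

theorem cand_nodup (p : Int) : (pvCand p).Nodup := by
  unfold pvCand
  refine nodup_flatMap_inj _
    (fun b => if PySem.List.pyGetD b 0 0 < pvM p then PySem.List.pyGetD b 0 0
      else p - PySem.List.pyGetD b 0 0) _ (PySem.List.nodup_pyRange_one 0 (pvM p)) ?_ ?_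
  · intro i hi
    have hib := PySem.List.mem_pyRange_one.mp hi
    refine nodup_flatMap_inj _
      (fun b => if PySem.List.pyGetD b 1 0 < pvM p then PySem.List.pyGetD b 1 0
        else p - PySem.List.pyGetD b 1 0) _
      (List.Nodup.filter _ (PySem.List.nodup_pyRange_one i (pvM p))) ?_ ?_
    · intro j hj
      have hjb := PySem.List.mem_pyRange_one.mp (List.mem_filter.mp hj).1
      refine nodup_flatMap_inj _
        (fun b => if PySem.List.pyGetD b 2 0 < pvM p then PySem.List.pyGetD b 2 0
          else p - PySem.List.pyGetD b 2 0) _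
        (List.Nodup.filter _ (PySem.List.nodup_pyRange_one j (pvM p))) ?_ ?_
      · intro k hk
        have hkb := PySem.List.mem_pyRange_one.mp (List.mem_filter.mp hk).1
        exact exp_nodup p i j k ⟨hib.1, hib.2⟩ ⟨by omega, hjb.2⟩ ⟨by omega, hkb.2⟩
      · intro k hk b hb
        have hkb := PySem.List.mem_pyRange_one.mp (List.mem_filter.mp hk).1
        obtain ⟨x, y, z, hx, hy, hz, hbe⟩ := mem_exp p i j k b hb
        subst hbe
        exact decode_negs p k z (by omega) hkb.2 hz
    · intro j hj b hb
      have hjb := PySem.List.mem_pyRange_one.mp (List.mem_filter.mp hj).1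
      obtain ⟨k, _, hbk⟩ := List.mem_flatMap.mp hb
      obtain ⟨x, y, z, hx, hy, hz, hbe⟩ := mem_exp p i j k b hbk
      subst hbe
      exact decode_negs p j y (by omega) hjb.2 hy
  · intro i hi b hb
    have hib := PySem.List.mem_pyRange_one.mp hi
    obtain ⟨j, _, hbj⟩ := List.mem_flatMap.mp hb
    obtain ⟨k, _, hbk⟩ := List.mem_flatMap.mp hbj
    obtain ⟨x, y, z, hx, hy, hz, hbe⟩ := mem_exp p i j k b hbk
    subst hbe
    exact decode_negs p i x hib.1 hib.2 hx

-- ---- B equals the candidate list ----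
theorem getD_map_range0 {β : Type} (f : Int → β) (m i : Int) (d : β) (h0 : 0 ≤ i)
    (h1 : i < m) : PySem.List.pyGetD ((PySem.List.pyRange 0 m 1).map f) i d = f i := by
  have hm : 0 < m := by omega
  have hmn : m = ((m.toNat : Nat) : Int) := by omega
  have hik : i = ((i.toNat : Nat) : Int) := by omega
  rw [hmn, hik, PySem.List.pyGetD_map_pyRange f m.toNat i.toNat d (by omega)]

theorem sq_get (p i : Int) (h0 : 0 ≤ i) (h1 : i < pvM p) :
    PySem.List.pyGetD (pvSqL p) i 0 = pvSq p i := by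
  unfold pvSqL
  rw [getD_map_range0 _ _ _ _ h0 h1]
  rfl

theorem neg_get (p i : Int) (h0 : 0 ≤ i) (h1 : i < pvM p) :
    PySem.List.pyGetD (pvNegL p) i [] = pvNegs p i := by
  unfold pvNegL pvNegs
  rw [getD_map_range0 _ _ _ _ h0 h1]

theorem good_get (p i : Int) (h0 : 0 ≤ i) (h1 : i < pvM p) :
    PySem.List.pyGetD (pvGoodL p) i []
      = (PySem.List.pyRange i (pvM p) 1).filter (fun j => pvAB p i j) := by
  unfold pvGoodL
  rw [getD_map_range0 _ _ _ _ h0 h1]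
  refine List.filter_congr ?_
  intro j hj
  have hjb := PySem.List.mem_pyRange_one.mp hj
  rw [sq_get p i h0 h1, sq_get p j (by omega) hjb.2, res_contains]
  rfl

theorem klist (p i j : Int) (h0 : 0 ≤ i) (hij : i ≤ j) (hjm : j < pvM p) :
    ((PySem.List.pyRange i (pvM p) 1).filter (fun k => pvAB p i k)).filter
      (fun k => decide (j ≤ k)
        && ((PySem.List.pyRange j (pvM p) 1).filter (fun k' => pvAB p j k')).contains k
        && (gen_quad_residues p).contains
          (PySem.Int.mod (pvSq p i + pvSq p j + PySem.List.pyGetD (pvSqL p) k 0) p))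
    = pvKs p i j := by
  rw [List.filter_filter]
  rw [PySem.List.pyRange_one_append i j (pvM p) hij (by omega), List.filter_append]
  have h1 : (PySem.List.pyRange i j 1).filter
      (fun k => (decide (j ≤ k)
        && ((PySem.List.pyRange j (pvM p) 1).filter (fun k' => pvAB p j k')).contains k
        && (gen_quad_residues p).contains
          (PySem.Int.mod (pvSq p i + pvSq p j + PySem.List.pyGetD (pvSqL p) k 0) p))
        && pvAB p i k) = [] := by
    refine List.filter_eq_nil_iff.mpr ?_
    intro k hk
    have hkb := PySem.List.mem_pyRange_one.mp hk
    simp [show ¬ (j ≤ k) by omega]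
  have h2 : (PySem.List.pyRange j (pvM p) 1).filter
      (fun k => (decide (j ≤ k)
        && ((PySem.List.pyRange j (pvM p) 1).filter (fun k' => pvAB p j k')).contains k
        && (gen_quad_residues p).contains
          (PySem.Int.mod (pvSq p i + pvSq p j + PySem.List.pyGetD (pvSqL p) k 0) p))
        && pvAB p i k) = pvKs p i j := by
    unfold pvKs
    refine List.filter_congr ?_
    intro k hk
    have hkb := PySem.List.mem_pyRange_one.mp hk
    rw [sq_get p k (by omega) hkb.2]
    have hdec : decide (j ≤ k) = true := by simp [hkb.1]
    have hcont : (((PySem.List.pyRange j (pvM p) 1).filter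
        (fun k' => pvAB p j k')).contains k) = pvAB p j k := by
      have hme : (((PySem.List.pyRange j (pvM p) 1).filter (fun k' => pvAB p j k')).contains k)
          = decide (k ∈ (PySem.List.pyRange j (pvM p) 1).filter (fun k' => pvAB p j k')) := by
        simp
      rw [hme]
      by_cases hc : pvAB p j k
      · simp [List.mem_filter, hk, hc]
      · simp [List.mem_filter, hc]
    rw [hdec, hcont]
    show ((true && pvAB p j k && pvSum p i j k) && pvAB p i k)
      = (pvAB p j k && pvAB p i k && pvSum p i j k)
    cases pvAB p j k <;> cases pvAB p i k <;> cases pvSum p i j k <;> rfl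
  rw [h1, h2]
  simp

theorem foldl_append_if_flat {α β : Type} (c : α → Bool) (f : α → List β) (l : List α)
    (acc : List β) :
    l.foldl (fun s x => if c x then s ++ f x else s) acc = acc ++ (l.filter c).flatMap f := by
  induction l generalizing acc with
  | nil => simp
  | cons a t ih =>
    rw [List.foldl_cons, List.filter_cons]
    by_cases h : c a
    · simp [h, ih]
    · simp [h, ih]

theorem B_eq_cand (p : Int) : get_pos_trios_alt p = pvCand p := by
  have hBB : get_pos_trios_alt p = pvB p := rfl
  rw [hBB]
  unfold pvB
  simp only [foldl_append_if_flat, PySem.List.foldl_append_eq_flatMap, List.nil_append]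
  unfold pvCand
  refine List.flatMap_congr ?_
  intro i hi
  have hib := PySem.List.mem_pyRange_one.mp hi
  simp only [good_get p i hib.1 hib.2, neg_get p i hib.1 hib.2, sq_get p i hib.1 hib.2,
    res_contains]
  refine List.flatMap_congr ?_
  intro j hj
  have hj' := List.mem_filter.mp hj
  have hjb := PySem.List.mem_pyRange_one.mp hj'.1
  have hnod : ((PySem.List.pyRange j (pvM p) 1).filter (fun k' => pvAB p j k')).Nodup :=
    List.Nodup.filter _ (PySem.List.nodup_pyRange_one j (pvM p))
  simp only [good_get p j (by omega) hjb.2, neg_get p j (by omega) hjb.2,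
    sq_get p j (by omega) hjb.2]
  simp only [PySem.Set.ofList_eq_self_of_nodup _ hnod, PySem.Set.contains_eq_listContains]
  rw [klist p i j hib.1 hjb.1 hjb.2]
  refine List.flatMap_congr ?_
  intro k hk
  have hk' := List.mem_filter.mp hk
  have hkb := PySem.List.mem_pyRange_one.mp hk'.1
  simp only [neg_get p k (by omega) hkb.2]
  rfl

-- ===== VERDICT (by name: the statement is the Claim_ definition above) =====
theorem get_pos_trios_spec : Claim_equal_get_pos_trios := by
  intro p _
  unfold Spec_get_pos_trios
  rw [A_eq_fold, B_eq_cand, foldl_dd_nodup (pvCand p) [] (by simpa using cand_nodup p)]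
  simp
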